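-- pv_equiv track=rewrite | github.com/pkuranchie/algorithmsrepo | algo/Lesson_4/sum_between_min_and_max.py | sum_between_min_and_max
-- ===== SOURCE A (Python) =====
-- def sum_between_min_and_max(arr):
--     if len(arr) <= 2:
--         return -1
--
--     min_value = max_value = arr[0]
--     min_index = max_index = i = 0
--
--     while i < len(arr):
--         if arr[i] > max_value:
--             max_value = arr[i]
--             max_index = i
--         if arr[i] < min_value:
--             min_value = arr[i]
--             min_index = i
--         i = i + 1
--
--     return sum(arr[min(min_index, max_index) + 1:max(min_index, max_index)])
-- ===== SOURCE B (Python) =====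
-- def sum_between_min_and_max(arr):
--     if len(arr) <= 2:
--         return -1
--     mn, mx = min(arr), max(arr)
--     total = 0
--     it = iter(arr)
--     for v in it:
--         if v == mn or v == mx:
--             other = mx if v == mn else mn
--             break
--     for v in it:
--         if v == other:
--             break
--         total += v
--     return total
-- ===== Notes on version B (the rewrite author's own statement) =====
-- stated objective: alternative
-- what changed: Replaces A's index-tracking scan plus slice-and-sum with an index-free two-phase state machine over one shared iterator: min()/max() give the extremal values, the first loop advances to the first occurrence of either extremum, the second loop accumulates elements until the other extremum appears; no indices or slicing are used.
import Mathlib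
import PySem

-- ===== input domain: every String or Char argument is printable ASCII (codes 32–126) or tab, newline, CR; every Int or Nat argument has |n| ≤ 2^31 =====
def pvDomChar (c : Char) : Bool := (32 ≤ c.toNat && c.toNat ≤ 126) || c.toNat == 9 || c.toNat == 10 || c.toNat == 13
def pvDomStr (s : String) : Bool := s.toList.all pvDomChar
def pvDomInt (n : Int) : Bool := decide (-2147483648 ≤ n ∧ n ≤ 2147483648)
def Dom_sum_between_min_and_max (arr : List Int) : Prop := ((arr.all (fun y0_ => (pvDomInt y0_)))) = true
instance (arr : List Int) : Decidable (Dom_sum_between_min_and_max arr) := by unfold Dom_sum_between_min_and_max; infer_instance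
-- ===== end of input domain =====

-- B replaces A's index-tracking scan + slice-and-sum by an index-free two-phase
-- state machine over one shared iterator (advance to the first extremum, then
-- accumulate until the other extremum); objective: alternative decomposition.

-- ===== PORT A =====
-- the while loop: i walks the array; the remaining suffix is the first argument
def pvALoop : List Int → Int → Int → Nat → Nat → Nat → Int × Int × Nat × Nat
  | [], mn, mx, mni, mxi, _ => (mn, mx, mni, mxi)
  | x :: rest, mn, mx, mni, mxi, i =>
    let mx' := if x > mx then x else mx
    let mxi' := if x > mx then i else mxi
    let mn' := if x < mn then x else mn
    let mni' := if x < mn then i else mni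
    pvALoop rest mn' mx' mni' mxi' (i + 1)

def sum_between_min_and_max (arr : List Int) : Int :=
  if arr.length ≤ 2 then -1
  else
    match arr with
    | [] => -1  -- unreachable: length > 2
    | a :: _ =>
      let r := pvALoop arr a a 0 0 0
      let mni := r.2.2.1
      let mxi := r.2.2.2
      (PySem.List.slice arr (some ((min mni mxi : Nat) + 1 : Int)) (some ((max mni mxi : Nat) : Int))).sum

-- ===== PORT B =====
-- first for-loop: advance through the list until an element equal to mn or mx
-- is found; return (other, remaining iterator); none = iterator exhausted
def pvBScan (mn mx : Int) : List Int → Option (Int × List Int)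
  | [] => none
  | v :: rest =>
    if v = mn ∨ v = mx then some ((if v = mn then mx else mn), rest)
    else pvBScan mn mx rest

-- second for-loop: add elements to total until one equal to `other` appears
def pvBAcc (other : Int) (total : Int) : List Int → Int
  | [] => total
  | v :: rest => if v = other then total else pvBAcc other (total + v) rest

def sum_between_min_and_max_alt (arr : List Int) : Int :=
  if arr.length ≤ 2 then -1
  else
    match PySem.List.min? arr (fun y => y), PySem.List.max? arr (fun y => y) with
    | some mn, some mx =>
      match pvBScan mn mx arr with
      | some (other, rest) => pvBAcc other 0 rest
      | none => 0  -- Python: first loop never breaks, second loop sees an exhausted iterator, total stays 0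
    | _, _ => -1  -- unreachable: arr nonempty

-- ===== PRECONDITION & SPEC =====
def Spec_sum_between_min_and_max (arr : List Int) (out : Int) : Prop := out = sum_between_min_and_max_alt arr
instance (arr : List Int) (out : Int) : Decidable (Spec_sum_between_min_and_max arr out) := by unfold Spec_sum_between_min_and_max; infer_instance

-- ===== CLAIM (what is proved, stated in full; the proofs are below) =====
def Claim_equal_sum_between_min_and_max : Prop := ∀ (arr : List Int), Dom_sum_between_min_and_max arr → Spec_sum_between_min_and_max arr (sum_between_min_and_max arr)

-- ===== LEMMAS AND PROOFS =====

-- first-occurrence index, total (argument always a member where used)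
def pvFIdx (l : List Int) (v : Int) : Nat := (PySem.List.index? l v).getD 0

theorem pvFIdx_append_of_mem (l t : List Int) (v : Int) (h : v ∈ l) :
    pvFIdx (l ++ t) v = pvFIdx l v := by
  unfold pvFIdx; rw [PySem.List.index?_append_of_mem t h]

theorem pvFIdx_append_self (l : List Int) (v : Int) (h : v ∉ l) :
    pvFIdx (l ++ [v]) v = l.length := by
  unfold pvFIdx; rw [PySem.List.index?_append_singleton_self l v h]; rfl

theorem pvFoldlMin_mem (a : Int) (t : List Int) : t.foldl min a ∈ a :: t :=
  PySem.List.min?_mem (PySem.List.min?_id_cons a t)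

theorem pvFoldlMin_le (a : Int) (t : List Int) : ∀ y ∈ a :: t, t.foldl min a ≤ y :=
  PySem.List.min?_isMin (PySem.List.min?_id_cons a t)

theorem pvFoldlMax_mem (a : Int) (t : List Int) : t.foldl max a ∈ a :: t :=
  PySem.List.max?_mem (PySem.List.max?_id_cons a t)

theorem pvFoldlMax_ge (a : Int) (t : List Int) : ∀ y ∈ a :: t, y ≤ t.foldl max a :=
  PySem.List.max?_isMax (PySem.List.max?_id_cons a t)

-- loop invariant: after having processed prefix a :: p, the loop state is the
-- min/max of that prefix together with the first index of each
theorem pvALoop_inv (rest : List Int) : ∀ (a : Int) (p : List Int)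
    (mn mx : Int) (mni mxi i : Nat),
    mn = p.foldl min a → mx = p.foldl max a →
    mni = pvFIdx (a :: p) mn → mxi = pvFIdx (a :: p) mx → i = p.length + 1 →
    pvALoop rest mn mx mni mxi i =
      ((p ++ rest).foldl min a, (p ++ rest).foldl max a,
       pvFIdx (a :: (p ++ rest)) ((p ++ rest).foldl min a),
       pvFIdx (a :: (p ++ rest)) ((p ++ rest).foldl max a)) := by
  induction rest with
  | nil =>
    intro a p mn mx mni mxi i hmn hmx hmni hmxi hi
    simp [pvALoop, hmn, hmx, hmni, hmxi]
  | cons x rest ih =>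
    intro a p mn mx mni mxi i hmn hmx hmni hmxi hi
    have hmnmem : mn ∈ a :: p := hmn ▸ pvFoldlMin_mem a p
    have hmnle : ∀ y ∈ a :: p, mn ≤ y := hmn ▸ pvFoldlMin_le a p
    have hmxmem : mx ∈ a :: p := hmx ▸ pvFoldlMax_mem a p
    have hmxge : ∀ y ∈ a :: p, y ≤ mx := hmx ▸ pvFoldlMax_ge a p
    show pvALoop rest _ _ _ _ _ = _
    have step := ih a (p ++ [x])
      (if x < mn then x else mn) (if x > mx then x else mx)
      (if x < mn then i else mni) (if x > mx then i else mxi) (i + 1)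
    rw [step]
    · have : (p ++ [x]) ++ rest = p ++ x :: rest := by simp
      rw [this]
    · rw [List.foldl_append]; simp only [List.foldl]; rw [← hmn]
      rcases lt_or_ge x mn with h | h
      · rw [if_pos h, min_eq_right h.le]
      · rw [if_neg (not_lt.mpr h), min_eq_left h]
    · rw [List.foldl_append]; simp only [List.foldl]; rw [← hmx]
      rcases lt_or_ge mx x with h | h
      · rw [if_pos h, max_eq_right h.le]
      · rw [if_neg (not_lt.mpr h), max_eq_left h]
    · -- first index of the new minimum
      have hcons : a :: (p ++ [x]) = (a :: p) ++ [x] := by simp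
      rcases lt_or_ge x mn with h | h
      · have hx : x ∉ a :: p := fun hmem => absurd (hmnle x hmem) (not_le.mpr h)
        rw [if_pos h, if_pos h, hcons, pvFIdx_append_self _ _ hx, hi]
        simp
      · have h' : ¬ x < mn := not_lt.mpr h
        rw [if_neg h', if_neg h', hcons, pvFIdx_append_of_mem _ _ _ hmnmem, hmni]
    · -- first index of the new maximum
      have hcons : a :: (p ++ [x]) = (a :: p) ++ [x] := by simp
      rcases lt_or_ge mx x with h | h
      · have hx : x ∉ a :: p := fun hmem => absurd (hmxge x hmem) (not_le.mpr h)
        rw [if_pos h, if_pos h, hcons, pvFIdx_append_self _ _ hx, hi]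
        simp
      · have h' : ¬ mx < x := not_lt.mpr h
        rw [if_neg h', if_neg h', hcons, pvFIdx_append_of_mem _ _ _ hmxmem, hmxi]
    · simp [hi]

theorem pvALoop_full (a : Int) (t : List Int) :
    pvALoop (a :: t) a a 0 0 0 =
      (t.foldl min a, t.foldl max a,
       pvFIdx (a :: t) (t.foldl min a), pvFIdx (a :: t) (t.foldl max a)) := by
  show pvALoop t (if a < a then a else a) (if a > a then a else a)
        (if a < a then 0 else 0) (if a > a then 0 else 0) (0 + 1) = _
  simp only [lt_irrefl, ite_self]
  have := pvALoop_inv t a [] a a 0 0 1 rfl rfl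
    (by simp [pvFIdx]) (by simp [pvFIdx]) rfl
  simpa using this

-- B-side lemmas --------------------------------------------------------------

-- a value whose first index is ≥ m does not occur in the first m elements
theorem pvNotMemTake (xs : List Int) (v : Int) (k m : Nat)
    (h : PySem.List.index? xs v = some k) (hmk : m ≤ k) : v ∉ xs.take m := by
  intro hmem
  obtain ⟨hk, -, hbefore⟩ := PySem.List.getElem_of_index?_eq_some h
  obtain ⟨j, hj, hje⟩ := List.mem_iff_getElem.mp hmem
  have hjm : j < m := by
    have := List.length_take_le m xs
    omega
  have hje2 : xs[j]'(by omega) = v := by simpa using hje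
  exact hbefore j (lt_of_lt_of_le hjm hmk) hje2

theorem pvScan_skip (mn mx : Int) (p l : List Int)
    (hmn : mn ∉ p) (hmx : mx ∉ p) :
    pvBScan mn mx (p ++ l) = pvBScan mn mx l := by
  induction p with
  | nil => rfl
  | cons x p ih =>
    have hx : ¬ (x = mn ∨ x = mx) := by
      rintro (rfl | rfl) <;> simp_all
    simp only [List.cons_append, pvBScan, if_neg hx]
    exact ih (fun h => hmn (List.mem_cons_of_mem _ h)) (fun h => hmx (List.mem_cons_of_mem _ h))

theorem pvAcc_hit (v : Int) (mid tail : List Int) (hv : v ∉ mid) :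
    ∀ acc : Int, pvBAcc v acc (mid ++ v :: tail) = acc + mid.sum := by
  induction mid with
  | nil => intro acc; simp [pvBAcc]
  | cons x mid ih =>
    intro acc
    have hx : x ≠ v := fun h => hv (h ▸ List.mem_cons_self)
    simp only [List.cons_append, pvBAcc, if_neg hx]
    rw [ih (fun h => hv (List.mem_cons_of_mem _ h))]
    simp [List.sum_cons]; ring

-- core: if u (one of mn/mx) first occurs at index m and the other value w at
-- index M > m, the two B loops compute the slice-sum between the indices
theorem pvCore (mn mx u w : Int) (arr : List Int) (m M : Nat)
    (humem : u = mn ∨ u = mx) (hwdef : w = (if u = mn then mx else mn))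
    (hiu : PySem.List.index? arr u = some m)
    (hiw : PySem.List.index? arr w = some M)
    (hmM : m < M)
    (hnm : mn ∉ arr.take m) (hnx : mx ∉ arr.take m) :
    pvBScan mn mx arr = some (w, arr.drop (m + 1)) ∧
    pvBAcc w 0 (arr.drop (m + 1)) =
      ((arr.drop (m + 1)).take (M - (m + 1))).sum := by
  obtain ⟨pre, suf, harr, hprelen, _⟩ := (PySem.List.index?_eq_some_iff arr u m).mp hiu
  have hpre : pre = arr.take m := by
    rw [harr, ← hprelen, List.take_left]
  have hdrop : arr.drop (m + 1) = suf := by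
    have h1 : arr = (pre ++ [u]) ++ suf := by simp [harr]
    have h2 : (pre ++ [u]).length = m + 1 := by simp [hprelen]
    rw [h1, ← h2, List.drop_left]
  have hscan : pvBScan mn mx arr = some (w, suf) := by
    rw [harr, pvScan_skip mn mx pre _ (hpre ▸ hnm) (hpre ▸ hnx)]
    simp only [pvBScan, if_pos humem, hwdef]
  refine ⟨by rw [hscan, hdrop], ?_⟩
  obtain ⟨preO, sufO, harrO, hpreOlen, hwO⟩ := (PySem.List.index?_eq_some_iff arr w M).mp hiw
  have hm1 : m + 1 ≤ preO.length := by omega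
  have hsplit : arr.drop (m + 1) = preO.drop (m + 1) ++ w :: sufO := by
    rw [harrO, List.drop_append_of_le_length hm1]
  have hmidlen : (preO.drop (m + 1)).length = M - (m + 1) := by
    simp [hpreOlen]
  have hwmid : w ∉ preO.drop (m + 1) := fun h => hwO (List.mem_of_mem_drop h)
  rw [hsplit, pvAcc_hit w _ sufO hwmid 0, ← hmidlen, List.take_left]
  simp

-- the accumulator loop stops immediately on a list of copies of its sentinel
theorem pvAcc_allsame (v : Int) (l : List Int) (h : ∀ y ∈ l, y = v) :
    pvBAcc v 0 l = 0 := by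
  cases l with
  | nil => rfl
  | cons b l2 => simp [pvBAcc, h b List.mem_cons_self]

-- every element equals the minimum when min = max
theorem pvAllEq (a : Int) (t : List Int) (h : t.foldl min a = t.foldl max a) :
    ∀ y ∈ a :: t, y = t.foldl min a := by
  intro y hy
  exact le_antisymm (h ▸ pvFoldlMax_ge a t y hy) (pvFoldlMin_le a t y hy)

-- ===== VERDICT (by name: the statement is the Claim_ definition above) =====
theorem sum_between_min_and_max_spec : Claim_equal_sum_between_min_and_max := by
  intro arr _
  unfold Spec_sum_between_min_and_max sum_between_min_and_max sum_between_min_and_max_alt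
  by_cases hlen : arr.length ≤ 2
  · simp [hlen]
  · rw [if_neg hlen, if_neg hlen]
    match arr, hlen with
    | a :: t, hlen =>
      rw [PySem.List.min?_id_cons, PySem.List.max?_id_cons]
      simp only [pvALoop_full]
      set mn := t.foldl min a with hmn
      set mx := t.foldl max a with hmx
      have hmnmem : mn ∈ a :: t := pvFoldlMin_mem a t
      have hmxmem : mx ∈ a :: t := pvFoldlMax_mem a t
      obtain ⟨lo, hlo⟩ := Option.isSome_iff_exists.mp
        ((PySem.List.index?_isSome_iff (a :: t) mn).mpr hmnmem)
      obtain ⟨hi, hhi⟩ := Option.isSome_iff_exists.mp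
        ((PySem.List.index?_isSome_iff (a :: t) mx).mpr hmxmem)
      have hflo : pvFIdx (a :: t) mn = lo := by unfold pvFIdx; rw [hlo]; rfl
      have hfhi : pvFIdx (a :: t) mx = hi := by unfold pvFIdx; rw [hhi]; rfl
      rw [hflo, hfhi]
      have hslice : (PySem.List.slice (a :: t) (some ((min lo hi : Nat) + 1 : Int))
          (some ((max lo hi : Nat) : Int))) =
          ((a :: t).drop (min lo hi + 1)).take (max lo hi - (min lo hi + 1)) := by
        have hc : ((min lo hi : Nat) + 1 : Int) = ((min lo hi + 1 : Nat) : Int) := by push_cast; ring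
        rw [hc, PySem.List.slice_natCast]
      rw [hslice]
      by_cases heq : mn = mx
      · -- min = max: all elements equal; both sides are 0
        have hlohi : lo = hi := by
          rw [heq] at hlo; rw [hlo] at hhi; exact (Option.some_inj.mp hhi)
        have hall : ∀ y ∈ a :: t, y = mn := by
          rw [hmn]; exact pvAllEq a t (by rw [← hmn, ← hmx]; exact heq)
        have ha : a = mn := hall a List.mem_cons_self
        have hscan : pvBScan mn mx (a :: t) = some (mx, t) := by
          simp [pvBScan, ← ha]
        rw [hscan]
        have hleft : ((a :: t).drop (min lo hi + 1)).take (max lo hi - (min lo hi + 1)) = [] := by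
          have : max lo hi - (min lo hi + 1) = 0 := by omega
          simp [this]
        rw [hleft]
        have hacc : pvBAcc mx 0 t = 0 :=
          pvAcc_allsame mx t (fun y hy => heq ▸ hall y (List.mem_cons_of_mem a hy))
        exact (show (([] : List Int)).sum = pvBAcc mx 0 t by simp [hacc])
      · -- min ≠ max: the state machine computes the between-slice sum
        have hlone : lo ≠ hi := by
          intro h
          obtain ⟨hk1, he1, -⟩ := PySem.List.getElem_of_index?_eq_some hlo
          obtain ⟨hk2, he2, -⟩ := PySem.List.getElem_of_index?_eq_some hhi
          subst h
          exact heq (he1.symm.trans he2)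
        rcases lt_or_gt_of_ne hlone with h | h
        · -- lo < hi : min value comes first
          have hcore := pvCore mn mx mn mx (a :: t) lo hi (Or.inl rfl)
            (by simp) hlo hhi h
            (pvNotMemTake _ mn lo lo hlo le_rfl)
            (pvNotMemTake _ mx hi lo hhi h.le)
          rw [min_eq_left h.le, max_eq_right h.le, hcore.1]
          exact hcore.2.symm
        · -- hi < lo : max value comes first
          have hne : mx ≠ mn := fun hh => heq hh.symm
          have hcore := pvCore mn mx mx mn (a :: t) hi lo (Or.inr rfl)
            (by simp [if_neg hne]) hhi hlo h
            (pvNotMemTake _ mn lo hi hlo h.le)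
            (pvNotMemTake _ mx hi hi hhi le_rfl)
          rw [min_eq_right h.le, max_eq_left h.le, hcore.1]
          exact hcore.2.symm
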